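-- pv_equiv track=rewrite | github.com/sushu0/seismic | sg_cunet_marmousi2/scripts/plot_fig5.py | tile_positions
-- ===== SOURCE A (Python) =====
-- def tile_positions(L, win, stride):
--     pos = [0]
--     while pos[-1] + win < L:
--         nxt = pos[-1] + stride
--         if nxt + win >= L:
--             pos.append(L - win)
--             break
--         pos.append(nxt)
--     return sorted(set(pos))
-- ===== SOURCE B (Python) =====
-- def tile_positions(L, win, stride):
--     if win >= L:
--         return [0]
--     last = L - win
--     out = [last]
--     p = (last - 1) // stride * stride  # largest grid point strictly below the boundary
--     while p > 0:
--         out.append(p)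
--         p -= stride
--     out.append(0)
--     return out[::-1]
-- ===== Notes on version B (the rewrite author's own statement) =====
-- stated objective: alternative
-- what changed: B builds the position list back-to-front: it starts from the boundary position L-win, computes the topmost interior grid point by floor division, walks DOWN by stride appending until it passes 0, and reverses -- no set, no sort, no forward scan with a dynamic break as in A. Pre_ excludes stride <= 0 with win < L, where A loops forever (never returns).
import Mathlib
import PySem

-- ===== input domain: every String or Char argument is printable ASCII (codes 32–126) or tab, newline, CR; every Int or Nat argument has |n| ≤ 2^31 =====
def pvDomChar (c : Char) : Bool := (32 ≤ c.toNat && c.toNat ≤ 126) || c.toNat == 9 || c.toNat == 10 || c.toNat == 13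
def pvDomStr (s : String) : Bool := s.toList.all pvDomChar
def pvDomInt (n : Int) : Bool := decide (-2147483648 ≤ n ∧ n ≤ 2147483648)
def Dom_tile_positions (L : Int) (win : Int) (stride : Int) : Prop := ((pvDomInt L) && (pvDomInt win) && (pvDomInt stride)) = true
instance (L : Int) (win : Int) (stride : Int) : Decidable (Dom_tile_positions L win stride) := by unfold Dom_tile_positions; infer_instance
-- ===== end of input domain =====

-- B builds the tiling positions back-to-front from the boundary L-win (top grid point by floor
-- division, then step down and reverse) instead of A's forward while-loop with break + sorted(set).

-- ===== PORT A =====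
-- A's while-loop; the '0 < stride' conjunct is a totality guard only (A diverges there; outside Pre_).
def pyALoop (L win stride p : Int) (acc : List Int) : List Int :=
  if _h : 0 < stride ∧ p + win < L then
    if p + stride + win ≥ L then acc ++ [L - win]
    else pyALoop L win stride (p + stride) (acc ++ [p + stride])
  else acc
termination_by (L - win - p).toNat
decreasing_by omega

def tile_positions (L : Int) (win : Int) (stride : Int) : List Int :=
  PySem.List.sorted (PySem.Set.ofList (pyALoop L win stride 0 [0])) (fun x => x) false

-- ===== PORT B =====
-- B's downward while-loop; the '0 < stride' conjunct is a totality guard only (outside Pre_).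
def pyBLoop (stride p : Int) (acc : List Int) : List Int :=
  if _h : 0 < stride ∧ 0 < p then pyBLoop stride (p - stride) (acc ++ [p])
  else acc ++ [0]
termination_by p.toNat
decreasing_by omega

def tile_positions_alt (L : Int) (win : Int) (stride : Int) : List Int :=
  if win ≥ L then [0]
  else
    -- out[::-1] is List.reverse (PySem.List.slice?_none_none_neg_one)
    (pyBLoop stride (PySem.Int.floordiv (L - win - 1) stride * stride) [L - win]).reverse

-- ===== PRECONDITION & SPEC =====
-- On stride ≤ 0 with win < L the Python A loops forever (never returns), so those inputs are excluded.
def Pre_tile_positions (L : Int) (win : Int) (stride : Int) : Prop := win ≥ L ∨ 0 < stride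
instance (L : Int) (win : Int) (stride : Int) : Decidable (Pre_tile_positions L win stride) := by
  unfold Pre_tile_positions; infer_instance

def pvWitness_tile_positions : Int × Int × Int := (10, 3, 2)

def Spec_tile_positions (L : Int) (win : Int) (stride : Int) (out : List Int) : Prop :=
  out = tile_positions_alt L win stride
instance (L : Int) (win : Int) (stride : Int) (out : List Int) : Decidable (Spec_tile_positions L win stride out) := by
  unfold Spec_tile_positions; infer_instance

-- ===== CLAIM (what is proved, stated in full; the proofs are below) =====
def Claim_equal_tile_positions : Prop := ∀ (L : Int) (win : Int) (stride : Int),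
  Dom_tile_positions L win stride → Pre_tile_positions L win stride →
  Spec_tile_positions L win stride (tile_positions L win stride)

-- ===== LEMMAS AND PROOFS =====

-- the ascending grid [0, s, 2s, …, k*s]
def ascL (s : Int) (k : Nat) : List Int := (List.range (k+1)).map (fun i : Nat => (i : Int) * s)

theorem lemB (s : Int) (hs : 0 < s) (k : Nat) (acc : List Int) :
    pyBLoop s ((k : Int) * s) acc = acc ++ (ascL s k).reverse := by
  induction k generalizing acc with
  | zero =>
      rw [pyBLoop]
      simp [ascL]
  | succ k ih =>
      rw [pyBLoop, dif_pos ⟨hs, by positivity⟩]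
      have harg : ((k + 1 : Nat) : Int) * s - s = (k : Int) * s := by push_cast; ring
      rw [harg, ih]
      simp [ascL, List.range_succ]

theorem lemA (L win s : Int) (hs : 0 < s) (N : Nat)
    (h1 : (N : Int) * s < L - win) (h2 : L - win ≤ (N : Int) * s + s)
    (k : Nat) (hk : k ≤ N) (acc : List Int) :
    pyALoop L win s ((k : Int) * s) acc
      = acc ++ (List.range (N - k)).map (fun i : Nat => ((k : Int) + 1 + (i : Int)) * s) ++ [L - win] := by
  have hkN : (k : Int) * s ≤ (N : Int) * s := by
    apply mul_le_mul_of_nonneg_right _ hs.le; exact_mod_cast hk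
  rw [pyALoop, dif_pos ⟨hs, by omega⟩]
  by_cases hstop : (k : Int) * s + s + win ≥ L
  · rw [if_pos hstop]
    have hkN' : k = N := by
      by_contra hne
      have hklt : k < N := lt_of_le_of_ne hk hne
      have : ((k : Int) + 1) * s ≤ (N : Int) * s := by
        apply mul_le_mul_of_nonneg_right _ hs.le; exact_mod_cast hklt
      nlinarith
    subst hkN'
    simp
  · rw [if_neg hstop]
    have hklt : k < N := by
      by_contra hge
      have : k = N := by omega
      subst this; omega
    have harg : (k : Int) * s + s = ((k + 1 : Nat) : Int) * s := by push_cast; ring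
    rw [harg, lemA L win s hs N h1 h2 (k + 1) (by omega) (acc ++ [((k + 1 : Nat) : Int) * s])]
    rw [show N - k = (N - (k + 1)) + 1 from by omega, List.range_succ_eq_map]
    simp only [List.map_cons, List.map_map, Function.comp_def, List.append_assoc,
      List.cons_append]
    congr 1
    congr 1
    simp only [List.nil_append]
    congr 1
    refine List.map_congr_left fun i _ => ?_
    push_cast; ring
termination_by N - k

-- set(xs) leaves a duplicate-free list unchanged
theorem ofList_acc (xs : List Int) : ∀ acc : List Int, (acc ++ xs).Nodup →
    xs.foldl PySem.Set.add acc = acc ++ xs := by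
  induction xs with
  | nil => intro acc _; simp
  | cons x t ih =>
      intro acc h
      have hx : x ∉ acc := by
        intro hmem
        have := List.disjoint_of_nodup_append h
        exact this hmem (by simp)
      simp only [List.foldl_cons]
      have hadd : PySem.Set.add acc x = acc ++ [x] := by
        simp [PySem.Set.add, PySem.Set.contains, hx]
      rw [hadd, ih (acc ++ [x]) (by simpa using h)]
      simp
theorem ofList_nodup (xs : List Int) (h : xs.Nodup) : PySem.Set.ofList xs = xs := by
  have := ofList_acc xs [] (by simpa using h)
  rw [PySem.Set.ofList_eq_foldl]
  simpa using this

theorem pairwise_grid (s : Int) (hs : 0 < s) (N : Nat) (last : Int) (hlt : (N : Int) * s < last) :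
    (ascL s N ++ [last]).Pairwise (· < ·) := by
  rw [List.pairwise_append]
  refine ⟨?_, by simp, ?_⟩
  · unfold ascL
    rw [List.pairwise_map]
    refine (List.pairwise_lt_range).imp ?_
    intro a b hab
    have : (a : Int) < (b : Int) := by exact_mod_cast hab
    exact mul_lt_mul_of_pos_right this hs
  · intro a ha b hb
    simp only [List.mem_singleton] at hb
    subst hb
    unfold ascL at ha
    simp only [List.mem_map, List.mem_range] at ha
    obtain ⟨i, hi, rfl⟩ := ha
    have hin : (i : Int) ≤ (N : Int) := by exact_mod_cast Nat.le_of_lt_succ hi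
    have : (i : Int) * s ≤ (N : Int) * s := mul_le_mul_of_nonneg_right hin hs.le
    omega

-- ===== VERDICT (by name: the statement is the Claim_ definition above) =====
theorem tile_positions_spec : Claim_equal_tile_positions := by
  intro L win s _ hpre
  unfold Spec_tile_positions tile_positions tile_positions_alt
  by_cases hwin : win ≥ L
  · rw [if_pos hwin, pyALoop, dif_neg (by omega)]
    decide
  · rw [if_neg hwin]
    have hs : 0 < s := by
      rcases hpre with h | h
      · omega
      · exact h
    set last := L - win with hlast
    have hlast1 : 1 ≤ last := by omega
    have hfd0 : 0 ≤ PySem.Int.floordiv (last - 1) s := by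
      rw [PySem.Int.floordiv_eq_ediv_of_pos hs]
      exact Int.ediv_nonneg (by omega) hs.le
    set N : Nat := (PySem.Int.floordiv (last - 1) s).toNat with hN
    have hNval : (N : Int) = PySem.Int.floordiv (last - 1) s := by omega
    have hiff := (PySem.Int.floordiv_eq_iff_of_pos hs).mp hNval.symm
    have h1 : (N : Int) * s < last := by omega
    have h2 : last ≤ (N : Int) * s + s := by nlinarith [hiff.2]
    -- B side
    have hB : (pyBLoop s (PySem.Int.floordiv (last - 1) s * s) [last]).reverse
        = ascL s N ++ [last] := by
      rw [← hNval, lemB s hs N [last]]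
      simp
    rw [hB]
    -- A side: the built list is exactly the ascending grid plus the boundary
    have hA : pyALoop L win s 0 [0] = ascL s N ++ [last] := by
      have h := lemA L win s hs N (by omega) (by omega) 0 (Nat.zero_le N) [0]
      simp only [Nat.cast_zero, zero_mul, Nat.sub_zero] at h
      rw [h]
      unfold ascL
      rw [List.range_succ_eq_map]
      simp only [List.map_cons, Nat.cast_zero, zero_mul, List.map_map, Function.comp_def,
        List.nil_append, List.cons_append]
      congr 2
      refine List.map_congr_left fun i _ => ?_
      push_cast
      ring
    rw [hA]
    have hpw := pairwise_grid s hs N last h1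
    rw [ofList_nodup _ (hpw.imp ne_of_lt)]
    exact PySem.List.sorted_eq_self_of_pairwise _ _ (hpw.imp le_of_lt)
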